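-- pv_equiv track=rewrite | github.com/eshiroiwa/leilao_ia_2 | leilao_ia_v2/services/cache_media_leilao.py | _fatias_amostras_cache
-- ===== SOURCE A (Python) =====
-- from typing import Any, Literal, Optional
--
-- def _fatias_amostras_cache(
--     amostras: list[dict[str, Any]],
--     cap_principal: int,
--     cap_lote: int,
-- ) -> tuple[list[dict[str, Any]], list[list[dict[str, Any]]]]:
--     """Primeira fatia = cache principal (simulação); demais fatias = referência, em lotes de ``cap_lote`` itens."""
--     if not amostras:
--         return [], []
--     c0 = max(1, int(cap_principal))
--     step = max(1, int(cap_lote))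
--     pri = amostras[:c0]
--     rest = amostras[c0:]
--     sec: list[list[dict[str, Any]]] = []
--     for i in range(0, len(rest), step):
--         chunk = rest[i : i + step]
--         if chunk:
--             sec.append(chunk)
--     return pri, sec
-- ===== SOURCE B (Python) =====
-- def _fatias_amostras_cache(amostras, cap_principal, cap_lote):
--     """Single linear pass with an incremental batch buffer instead of slicing."""
--     if not amostras:
--         return [], []
--     c0 = max(1, int(cap_principal))
--     step = max(1, int(cap_lote))
--     pri = []
--     sec = []
--     buf = []
--     for i, s in enumerate(amostras):
--         if i < c0:
--             pri.append(s)
--         else: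
--             buf.append(s)
--             if len(buf) == step:
--                 sec.append(buf)
--                 buf = []
--     if buf:
--         sec.append(buf)
--     return pri, sec
-- ===== Notes on version B (the rewrite author's own statement) =====
-- stated objective: alternative
-- what changed: Replaces the slice-based decomposition (copying pri/rest and re-slicing rest per chunk index) with one linear enumerate pass that appends to the primary list or to an incremental batch buffer flushed at size step and once at the end.
import Mathlib
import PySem

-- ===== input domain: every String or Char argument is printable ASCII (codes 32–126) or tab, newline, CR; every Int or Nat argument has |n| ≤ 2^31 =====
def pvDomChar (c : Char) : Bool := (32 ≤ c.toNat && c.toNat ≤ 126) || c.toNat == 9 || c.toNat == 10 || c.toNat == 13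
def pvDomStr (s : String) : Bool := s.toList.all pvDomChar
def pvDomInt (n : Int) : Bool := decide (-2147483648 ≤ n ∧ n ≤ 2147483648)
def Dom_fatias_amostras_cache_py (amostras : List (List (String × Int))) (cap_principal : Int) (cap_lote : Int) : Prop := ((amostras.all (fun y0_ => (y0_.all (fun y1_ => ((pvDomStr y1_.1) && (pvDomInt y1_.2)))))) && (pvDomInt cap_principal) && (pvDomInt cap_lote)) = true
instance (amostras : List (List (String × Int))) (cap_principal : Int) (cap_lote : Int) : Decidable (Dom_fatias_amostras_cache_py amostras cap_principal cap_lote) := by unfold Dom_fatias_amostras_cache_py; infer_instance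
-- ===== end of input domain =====

-- B replaces A's slice-based decomposition by one linear pass with an incremental batch buffer (objective: alternative, same cost).

-- ===== PORT A =====
-- literal transliteration of A: early return on empty, clamp caps, slice pri/rest, chunk rest by slicing at range(0, len, step)
def fatias_amostras_cache_py (amostras : List (List (String × Int))) (cap_principal : Int) (cap_lote : Int) : (List (List (String × Int))) × (List (List (List (String × Int)))) :=
  if amostras = [] then ([], [])
  else
    let c0 : Int := max 1 cap_principal
    let step : Int := max 1 cap_lote
    let pri := PySem.List.slice amostras (some 0) (some c0)
    let rest := PySem.List.slice amostras (some c0) none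
    let sec := (PySem.List.pyRange 0 (rest.length : Int) step).foldl
      (fun acc i =>
        let chunk := PySem.List.slice rest (some i) (some (i + step))
        if chunk = [] then acc else acc ++ [chunk]) []
    (pri, sec)

-- ===== PORT B =====
-- literal transliteration of B (Source B): one enumerate fold over (pri, sec, buf), flushing buf at size step and once at the end
def fatias_amostras_cache_py_alt (amostras : List (List (String × Int))) (cap_principal : Int) (cap_lote : Int) : (List (List (String × Int))) × (List (List (List (String × Int)))) :=
  if amostras = [] then ([], [])
  else
    let c0 : Int := max 1 cap_principal
    let step : Int := max 1 cap_lote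
    let st := (PySem.List.enumerate amostras 0).foldl
      (fun (st : List (List (String × Int)) × List (List (List (String × Int))) × List (List (String × Int))) p =>
        if p.1 < c0 then (st.1 ++ [p.2], st.2.1, st.2.2)
        else
          let buf' := st.2.2 ++ [p.2]
          if (buf'.length : Int) = step then (st.1, st.2.1 ++ [buf'], ([] : List (List (String × Int))))
          else (st.1, st.2.1, buf'))
      ([], [], [])
    if st.2.2 = [] then (st.1, st.2.1) else (st.1, st.2.1 ++ [st.2.2])

-- ===== PRECONDITION & SPEC =====
def Spec_fatias_amostras_cache_py (amostras : List (List (String × Int))) (cap_principal : Int) (cap_lote : Int) (out : (List (List (String × Int))) × (List (List (List (String × Int))))) : Prop := out = fatias_amostras_cache_py_alt amostras cap_principal cap_lote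
instance (amostras : List (List (String × Int))) (cap_principal : Int) (cap_lote : Int) (out : (List (List (String × Int))) × (List (List (List (String × Int))))) : Decidable (Spec_fatias_amostras_cache_py amostras cap_principal cap_lote out) := by unfold Spec_fatias_amostras_cache_py; infer_instance

-- ===== CLAIM (what is proved, stated in full; the proofs are below) =====
def Claim_equal_fatias_amostras_cache_py : Prop := ∀ (amostras : List (List (String × Int))) (cap_principal : Int) (cap_lote : Int), Dom_fatias_amostras_cache_py amostras cap_principal cap_lote → Spec_fatias_amostras_cache_py amostras cap_principal cap_lote (fatias_amostras_cache_py amostras cap_principal cap_lote)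

-- ===== LEMMAS AND PROOFS =====

-- the common mathematical value: greedy chunking into blocks of sk
def chunks {α : Type} (sk : Nat) : List α → List (List α)
  | [] => []
  | x :: xs => (x :: xs.take (sk - 1)) :: chunks sk (xs.drop (sk - 1))
  termination_by l => l.length
  decreasing_by simp

theorem chunks_nil {α : Type} (sk : Nat) : chunks sk ([] : List α) = [] := by
  rw [chunks]

theorem chunks_cons {α : Type} (sk : Nat) (x : α) (xs : List α) :
    chunks sk (x :: xs) = (x :: xs.take (sk - 1)) :: chunks sk (xs.drop (sk - 1)) := by
  rw [chunks]

theorem chunks_cons_eq {α : Type} (sk : Nat) (hsk : 0 < sk) (l : List α) (hl : l ≠ []) :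
    chunks sk l = l.take sk :: chunks sk (l.drop sk) := by
  cases l with
  | nil => exact absurd rfl hl
  | cons x xs =>
    obtain ⟨m, rfl⟩ : ∃ m, sk = m + 1 := ⟨sk - 1, by omega⟩
    rw [chunks_cons]
    simp

theorem cdiv_succ (sk : Nat) (hsk : 0 < sk) (n : Nat) (hn : 1 ≤ n) :
    (n + sk - 1) / sk = (n - sk + sk - 1) / sk + 1 := by
  by_cases h : n ≤ sk
  · have h1 : n + sk - 1 = (n - 1) + sk := by omega
    have h2 : n - sk = 0 := by omega
    rw [h1, Nat.add_div_right _ hsk, h2]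
    rw [Nat.div_eq_of_lt (by omega), Nat.div_eq_of_lt (by omega)]
  · have h1 : n + sk - 1 = (n - 1) + sk := by omega
    have h2 : n - sk + sk - 1 = (n - sk - 1) + sk := by omega
    have h3 : n - 1 = (n - sk - 1) + sk := by omega
    rw [h1, h2, Nat.add_div_right _ hsk, Nat.add_div_right _ hsk, h3,
      Nat.add_div_right _ hsk]

-- A's chunking loop, after reduction to Nat indices, computes `chunks`
theorem A2 {α : Type} (sk : Nat) (hsk : 0 < sk) :
    ∀ (n : Nat) (rest : List α), rest.length = n → ∀ (acc : List (List α)),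
      (List.range ((rest.length + sk - 1) / sk)).foldl
        (fun acc k => if (rest.drop (sk * k)).take sk = [] then acc
          else acc ++ [(rest.drop (sk * k)).take sk]) acc
      = acc ++ chunks sk rest := by
  intro n
  induction n using Nat.strong_induction_on with
  | _ n ih =>
    intro rest hlen acc
    cases rest with
    | nil => simp [chunks_nil]
    | cons x xs =>
      have hpos : 1 ≤ (x :: xs).length := by simp
      rw [cdiv_succ sk hsk _ hpos, List.range_succ_eq_map, List.foldl_cons, List.foldl_map]
      have hne : ((x :: xs).drop (sk * 0)).take sk ≠ [] := by
        simp [List.take_eq_nil_iff]; omega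
      rw [if_neg hne]
      have hdd : ∀ k : Nat, (x :: xs).drop (sk * (k + 1)) = ((x :: xs).drop sk).drop (sk * k) := by
        intro k
        rw [List.drop_drop]
        congr 1
        ring
      have hlen' : ((x :: xs).drop sk).length = (x :: xs).length - sk := by
        simp
      have hcong : ∀ (a : List (List α)) (k : Nat),
          (fun acc k => if ((x :: xs).drop (sk * (k + 1))).take sk = [] then acc
            else acc ++ [((x :: xs).drop (sk * (k + 1))).take sk]) a k
          = (fun acc k => if (((x :: xs).drop sk).drop (sk * k)).take sk = [] then acc
            else acc ++ [(((x :: xs).drop sk).drop (sk * k)).take sk]) a k := by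
        intro a k
        simp only [hdd]
      rw [PySem.List.foldl_congr_mem _ _ _ _ (by intro a k _; exact hcong a k)]
      have hsmall : ((x :: xs).drop sk).length < n := by
        rw [hlen', ← hlen]; simp; omega
      have := ih _ hsmall ((x :: xs).drop sk) rfl
        (acc ++ [((x :: xs).drop (sk * 0)).take sk])
      rw [hlen'] at this
      rw [this]
      rw [chunks_cons_eq sk hsk (x :: xs) (by simp)]
      simp

-- B's fold ignores indices that are ≥ c0 (phase 2 reduces to a plain fold)
-- and appends items with index < c0 to pri (phase 1)
theorem B1 (c0 step : Int) (xs : List (List (String × Int))) :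
    ∀ (s : Int) (pri : List (List (String × Int)))
      (sec : List (List (List (String × Int)))) (buf : List (List (String × Int))),
      s + xs.length ≤ c0 →
      (PySem.List.enumerate xs s).foldl
        (fun (st : List (List (String × Int)) × List (List (List (String × Int))) × List (List (String × Int))) p =>
          if p.1 < c0 then (st.1 ++ [p.2], st.2.1, st.2.2)
          else
            let buf' := st.2.2 ++ [p.2]
            if (buf'.length : Int) = step then (st.1, st.2.1 ++ [buf'], ([] : List (List (String × Int))))
            else (st.1, st.2.1, buf')) (pri, sec, buf)
      = (pri ++ xs, sec, buf) := by
  induction xs with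
  | nil => intro s pri sec buf _; simp [PySem.List.enumerate_nil]
  | cons x xs ih =>
    intro s pri sec buf h
    rw [PySem.List.enumerate_cons, List.foldl_cons]
    have hs : s < c0 := by simp at h; omega
    simp only [if_pos hs]
    rw [ih (s + 1) (pri ++ [x]) sec buf (by simp at h ⊢; omega)]
    simp

theorem B2 (c0 step : Int) (xs : List (List (String × Int))) :
    ∀ (s : Int)
      (st : List (List (String × Int)) × List (List (List (String × Int))) × List (List (String × Int))),
      c0 ≤ s →
      (PySem.List.enumerate xs s).foldl
        (fun (st : List (List (String × Int)) × List (List (List (String × Int))) × List (List (String × Int))) p =>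
          if p.1 < c0 then (st.1 ++ [p.2], st.2.1, st.2.2)
          else
            let buf' := st.2.2 ++ [p.2]
            if (buf'.length : Int) = step then (st.1, st.2.1 ++ [buf'], ([] : List (List (String × Int))))
            else (st.1, st.2.1, buf')) st
      = xs.foldl
        (fun (st : List (List (String × Int)) × List (List (List (String × Int))) × List (List (String × Int))) x =>
          let buf' := st.2.2 ++ [x]
          if (buf'.length : Int) = step then (st.1, st.2.1 ++ [buf'], ([] : List (List (String × Int))))
          else (st.1, st.2.1, buf')) st := by
  induction xs with
  | nil => intro s st _; simp [PySem.List.enumerate_nil]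
  | cons x xs ih =>
    intro s st h
    rw [PySem.List.enumerate_cons, List.foldl_cons, List.foldl_cons]
    have hs : ¬ s < c0 := by omega
    simp only [if_neg hs]
    exact ih (s + 1) _ (by omega)

-- phase 2 with a partial buffer plus the final flush computes `chunks`
theorem B3 (step : Int) (sk : Nat) (hsk : 0 < sk) (hstep : (sk : Int) = step)
    (pri : List (List (String × Int))) :
    ∀ (n : Nat) (xs : List (List (String × Int))), xs.length = n →
    ∀ (sec : List (List (List (String × Int)))) (buf : List (List (String × Int))),
      buf.length < sk →
      (let st := xs.foldl
        (fun (st : List (List (String × Int)) × List (List (List (String × Int))) × List (List (String × Int))) x =>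
          let buf' := st.2.2 ++ [x]
          if (buf'.length : Int) = step then (st.1, st.2.1 ++ [buf'], ([] : List (List (String × Int))))
          else (st.1, st.2.1, buf')) (pri, sec, buf)
       if st.2.2 = [] then (st.1, st.2.1) else (st.1, st.2.1 ++ [st.2.2]))
      = (pri, sec ++ chunks sk (buf ++ xs)) := by
  intro n
  induction n using Nat.strong_induction_on with
  | _ n ih =>
    intro xs hlen sec buf hbuf
    cases xs with
    | nil =>
      cases hb : buf with
      | nil => simp [chunks_nil]
      | cons b bs =>
        subst hb
        simp only [List.foldl_nil, List.append_nil]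
        have hne : (b :: bs : List (List (String × Int))) ≠ [] := by simp
        rw [if_neg hne]
        have : chunks sk (b :: bs) = [b :: bs] := by
          rw [chunks_cons_eq sk hsk _ hne]
          rw [List.take_of_length_le (by simp at hbuf ⊢; omega),
            List.drop_of_length_le (by simp at hbuf ⊢; omega)]
          simp [chunks_nil]
        rw [this]
    | cons x xs =>
      rw [List.foldl_cons]
      by_cases hfull : ((buf ++ [x]).length : Int) = step
      · simp only [if_pos hfull]
        have hlenfull : (buf ++ [x]).length = sk := by
          have := hfull; rw [← hstep] at this; exact_mod_cast this
        have hrec := ih xs.length (by simp [← hlen]) xs rfl (sec ++ [buf ++ [x]]) [] hsk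
        simp only at hrec
        rw [hrec]
        have hch : chunks sk (buf ++ x :: xs) = (buf ++ [x]) :: chunks sk xs := by
          have hne : (buf ++ x :: xs : List (List (String × Int))) ≠ [] := by simp
          rw [chunks_cons_eq sk hsk _ hne]
          have h1 : (buf ++ x :: xs).take sk = buf ++ [x] := by
            rw [← hlenfull]
            have : buf ++ x :: xs = (buf ++ [x]) ++ xs := by simp
            rw [this, List.take_left]
          have h2 : (buf ++ x :: xs).drop sk = xs := by
            rw [← hlenfull]
            have : buf ++ x :: xs = (buf ++ [x]) ++ xs := by simp
            rw [this, List.drop_left]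
          rw [h1, h2]
        rw [hch]
        simp
      · simp only [if_neg hfull]
        have hlt : (buf ++ [x]).length < sk := by
          have h1 : ((buf ++ [x]).length : Int) ≠ step := hfull
          rw [← hstep] at h1
          have h2 : (buf ++ [x]).length ≠ sk := fun h => h1 (by exact_mod_cast h)
          simp at h2 ⊢
          omega
        have hrec := ih xs.length (by simp [← hlen]) xs rfl sec (buf ++ [x]) hlt
        simp only at hrec
        rw [hrec]
        simp

-- both ports compute (take c0 , chunks step (drop c0)) on nonempty input
theorem portA_eq (amostras : List (List (String × Int))) (cap_principal cap_lote : Int)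
    (hne : amostras ≠ []) :
    fatias_amostras_cache_py amostras cap_principal cap_lote
    = (amostras.take (max 1 cap_principal).toNat,
       chunks (max 1 cap_lote).toNat (amostras.drop (max 1 cap_principal).toNat)) := by
  have hc0 : (1 : Int) ≤ max 1 cap_principal := le_max_left _ _
  have hst : (1 : Int) ≤ max 1 cap_lote := le_max_left _ _
  set c0 : Int := max 1 cap_principal with hc0def
  set stp : Int := max 1 cap_lote with hstdef
  set sk : Nat := stp.toNat with hskdef
  have hstn : ((sk : Nat) : Int) = stp := by rw [hskdef]; exact Int.toNat_of_nonneg (by omega)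
  have hskpos : 0 < sk := by omega
  simp only [fatias_amostras_cache_py, if_neg hne]
  rw [PySem.List.slice_zero_start, PySem.List.slice_to _ (by omega),
    PySem.List.slice_from _ (by omega)]
  set rest := amostras.drop c0.toNat with hrest
  refine congrArg (Prod.mk _) ?_
  rw [PySem.List.pyRange_of_pos 0 (rest.length : Int) (by omega), List.foldl_map]
  refine Eq.trans (PySem.List.foldl_congr_mem _ _
    (fun acc k => if (rest.drop (sk * k)).take sk = [] then acc
      else acc ++ [(rest.drop (sk * k)).take sk]) [] ?_) ?_
  · intro acc k _
    show (if PySem.List.slice rest (some ((0 : Int) + stp * (k : Int)))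
            (some ((0 : Int) + stp * (k : Int) + stp)) = [] then acc
          else acc ++ [PySem.List.slice rest (some ((0 : Int) + stp * (k : Int)))
            (some ((0 : Int) + stp * (k : Int) + stp))])
        = (if (rest.drop (sk * k)).take sk = [] then acc
          else acc ++ [(rest.drop (sk * k)).take sk])
    have ha : ((0 : Int) + stp * (k : Int)) = ((sk * k : Nat) : Int) := by
      push_cast [hstn]; ring
    have hb : ((0 : Int) + stp * (k : Int) + stp) = ((sk * k + sk : Nat) : Int) := by
      push_cast [hstn]; ring
    have hs2 : PySem.List.slice rest (some ((0 : Int) + stp * (k : Int)))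
        (some ((0 : Int) + stp * (k : Int) + stp)) = (rest.drop (sk * k)).take sk := by
      rw [hb, ha, PySem.List.slice_toNat _ (by positivity) (by positivity),
        Int.toNat_natCast, Int.toNat_natCast,
        show sk * k + sk - sk * k = sk from by omega]
    rw [hs2]
  · have hcnt : (if (0 : Int) < (rest.length : Int)
        then (((rest.length : Int) - 0 + stp - 1) / stp).toNat else 0)
        = (rest.length + sk - 1) / sk := by
      by_cases hz : rest.length = 0
      · rw [hz, if_neg (by simp)]
        exact (Nat.div_eq_of_lt (by omega)).symm
      · rw [if_pos (by omega)]
        have hnum : ((rest.length : Int) - 0 + stp - 1) = ((rest.length + sk - 1 : Nat) : Int) := by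
          omega
        rw [hnum, show stp = ((sk : Nat) : Int) from hstn.symm, ← Int.natCast_div,
          Int.toNat_natCast]
    rw [hcnt, A2 sk hskpos rest.length rest rfl []]
    simp

theorem portB_eq (amostras : List (List (String × Int))) (cap_principal cap_lote : Int)
    (hne : amostras ≠ []) :
    fatias_amostras_cache_py_alt amostras cap_principal cap_lote
    = (amostras.take (max 1 cap_principal).toNat,
       chunks (max 1 cap_lote).toNat (amostras.drop (max 1 cap_principal).toNat)) := by
  have hc0 : (1 : Int) ≤ max 1 cap_principal := le_max_left _ _
  have hst : (1 : Int) ≤ max 1 cap_lote := le_max_left _ _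
  set c0 : Int := max 1 cap_principal with hc0def
  set stp : Int := max 1 cap_lote with hstdef
  have hstn : ((stp.toNat : Int)) = stp := Int.toNat_of_nonneg (by omega)
  have hc0n : ((c0.toNat : Int)) = c0 := Int.toNat_of_nonneg (by omega)
  have hskpos : 0 < stp.toNat := by omega
  simp only [fatias_amostras_cache_py_alt, if_neg hne]
  by_cases hcase : c0.toNat ≤ amostras.length
  · conv_lhs => rw [show amostras = amostras.take c0.toNat ++ amostras.drop c0.toNat from
      (List.take_append_drop _ _).symm]
    rw [PySem.List.enumerate_append, List.foldl_append]
    rw [B1 c0 stp _ 0 [] [] [] (by have := List.length_take_le c0.toNat amostras; omega)]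
    rw [B2 c0 stp _ _ _ (by rw [List.length_take_of_le hcase]; omega)]
    have h3 := B3 stp stp.toNat hskpos hstn ([] ++ amostras.take c0.toNat)
      (amostras.drop c0.toNat).length (amostras.drop c0.toNat) rfl [] [] hskpos
    simp only [List.nil_append] at h3 ⊢
    exact h3
  · have hdrop : amostras.drop c0.toNat = [] := List.drop_of_length_le (by omega)
    have htake : amostras.take c0.toNat = amostras := List.take_of_length_le (by omega)
    rw [hdrop, htake, chunks_nil]
    rw [B1 c0 stp _ 0 [] [] [] (by omega)]
    simp

-- ===== VERDICT (by name: the statement is the Claim_ definition above) =====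
theorem fatias_amostras_cache_py_spec : Claim_equal_fatias_amostras_cache_py := by
  intro amostras cap_principal cap_lote _
  unfold Spec_fatias_amostras_cache_py
  by_cases hne : amostras = []
  · subst hne
    simp [fatias_amostras_cache_py, fatias_amostras_cache_py_alt]
  · rw [portA_eq _ _ _ hne, portB_eq _ _ _ hne]
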